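-- pv_equiv track=rewrite | github.com/YiyongZhao/PhyloTracer | phylotracer/Ortho_Retriever.py | split_offcut_ev_seqs
-- ===== SOURCE A (Python) =====
-- def count_sps_num(ev_seqs: set) -> int:
--     """
--     Count unique species represented by gene identifiers.
--
--     Parameters
--     ----------
--     ev_seqs : set
--         Set of gene identifiers.
--
--     Returns
--     -------
--     int
--         Number of unique species inferred from gene prefixes.
--
--     Assumptions
--     -----------
--     Species codes are encoded in the first three characters of gene names.
--     """
--     sps_set = {gene[0:3] for gene in ev_seqs}
--     return len(sps_set)
--
-- def rm_dup(paralogs_L):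
--     """
--     Remove redundant paralog sets that are subsets of others.
--
--     Parameters
--     ----------
--     paralogs_L : list
--         List of paralogous gene sets.
--
--     Returns
--     -------
--     list
--         Deduplicated list of paralog sets.
--
--     Assumptions
--     -----------
--     Gene sets are represented as Python sets.
--     """
--     result = []
--     for i, ev_seqs1 in enumerate(paralogs_L):
--         is_proper_subset = False
--         for j, ev_seqs2 in enumerate(paralogs_L):
--             if i != j and ev_seqs1 < ev_seqs2:
--                 is_proper_subset = True
--                 break
--         if not is_proper_subset:
--             result.append(ev_seqs1)
--     return result
--
-- def split_offcut_ev_seqs(offcut_ev_seqs_L0: list) -> list: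
--     """
--     Split offcut sets into ortholog and paralog collections.
--
--     Parameters
--     ----------
--     offcut_ev_seqs_L0 : list
--         List of offcut gene sets.
--
--     Returns
--     -------
--     list
--         Tuple of (ortholog_sets, paralog_sets).
--
--     Assumptions
--     -----------
--     Species counts distinguish orthologs from paralogs.
--     """
--     othologs_L = []
--     paralogs_L = []
--     for ev_seqs in offcut_ev_seqs_L0:
--         sps_num, seq_num = count_sps_num(ev_seqs), len(ev_seqs)
--         if sps_num >= 2:
--             if seq_num > sps_num:
--                 paralogs_L.append(ev_seqs)
--             else:
--                 othologs_L.append(ev_seqs)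
--     paralogs_L = rm_dup(paralogs_L)
--     return othologs_L, paralogs_L
-- ===== SOURCE B (Python) =====
-- def split_offcut_ev_seqs(offcut_ev_seqs_L0: list) -> list:
--     """Classify offcut gene sets into orthologs/paralogs, then drop paralog sets
--     that are proper subsets of another paralog set (sort-by-size dedup)."""
--     def sps_num(ev_seqs):
--         return len({gene[0:3] for gene in ev_seqs})
--
--     othologs_L = [ev for ev in offcut_ev_seqs_L0
--                   if sps_num(ev) >= 2 and len(ev) <= sps_num(ev)]
--     paralogs_L = [ev for ev in offcut_ev_seqs_L0
--                   if sps_num(ev) >= 2 and len(ev) > sps_num(ev)]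
--
--     # dedup: visit candidates largest-first; a candidate dies only to an
--     # already-kept (strictly larger) set; survivors are re-emitted in input order
--     order = sorted(range(len(paralogs_L)), key=lambda k: -len(paralogs_L[k]))
--     kept = []  # (original index, set) of maximal sets seen so far
--     for k in order:
--         s = paralogs_L[k]
--         if not any(s < t for _, t in kept):
--             kept.append((k, s))
--     return othologs_L, [paralogs_L[k] for k in sorted(k for k, _ in kept)]
-- ===== Notes on version B (the rewrite author's own statement) =====
-- stated objective: alternative
-- what changed: The classification loop becomes two filters, and rm_dup's all-pairs proper-subset scan is replaced by sorting paralog indices by set size descending and a single pass that keeps maximal-so-far sets, dropping a candidate only against already-kept larger sets, then re-emitting survivors in input order.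
import Mathlib
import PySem

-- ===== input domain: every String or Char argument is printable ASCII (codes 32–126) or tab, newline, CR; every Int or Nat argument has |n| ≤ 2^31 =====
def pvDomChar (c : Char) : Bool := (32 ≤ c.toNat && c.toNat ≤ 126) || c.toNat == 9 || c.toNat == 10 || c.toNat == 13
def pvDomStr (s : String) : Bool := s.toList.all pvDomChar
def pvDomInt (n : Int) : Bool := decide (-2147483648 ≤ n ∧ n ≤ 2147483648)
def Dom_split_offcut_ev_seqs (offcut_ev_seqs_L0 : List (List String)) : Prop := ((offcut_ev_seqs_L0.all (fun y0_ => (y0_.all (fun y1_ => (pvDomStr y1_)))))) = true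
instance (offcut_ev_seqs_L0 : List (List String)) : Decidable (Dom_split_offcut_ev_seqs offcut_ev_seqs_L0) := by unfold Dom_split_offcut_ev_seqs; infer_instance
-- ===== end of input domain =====

-- B replaces rm_dup's all-pairs proper-subset scan by a sort-by-size-descending single pass that
-- keeps only maximal-so-far sets (survivors re-emitted in input order); objective: alternative.

-- ===== PORT A =====
def count_sps_num (ev_seqs : List String) : Int :=
  let sps_set : PySem.Set String :=
    PySem.Set.ofList (ev_seqs.map (fun gene => PySem.Str.slice gene (some 0) (some 3)))
  PySem.Set.len sps_set

-- Python 'ev_seqs1 < ev_seqs2' on sets: subset and not equal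
def pySetLt (ev_seqs1 ev_seqs2 : List String) : Bool :=
  PySem.Set.issubset ev_seqs1 ev_seqs2 && !(PySem.Set.equal ev_seqs1 ev_seqs2)

def rm_dup (paralogs_L : List (List String)) : List (List String) :=
  (PySem.List.enumerate paralogs_L).foldl (fun result ie =>
    let is_proper_subset := (PySem.List.enumerate paralogs_L).any (fun je =>
      decide (ie.1 ≠ je.1) && pySetLt ie.2 je.2)
    if is_proper_subset then result else result ++ [ie.2]) []

def split_offcut_ev_seqs (offcut_ev_seqs_L0 : List (List String)) :
    List (List String) × List (List String) :=
  let st := offcut_ev_seqs_L0.foldl (fun st ev_seqs =>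
    let sps_num := count_sps_num ev_seqs
    let seq_num := PySem.Set.len ev_seqs
    if 2 ≤ sps_num then
      if sps_num < seq_num then (st.1, st.2 ++ [ev_seqs]) else (st.1 ++ [ev_seqs], st.2)
    else st) (([], []) : List (List String) × List (List String))
  (st.1, rm_dup st.2)

-- ===== PORT B =====
def altSpsNum (ev : List String) : Int :=
  PySem.Set.len (PySem.Set.ofList (ev.map (fun gene => PySem.Str.slice gene (some 0) (some 3))))

def altLt (s t : List String) : Bool :=
  PySem.Set.issubset s t && !(PySem.Set.equal s t)

def split_offcut_ev_seqs_alt (offcut_ev_seqs_L0 : List (List String)) :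
    List (List String) × List (List String) :=
  let othologs_L := offcut_ev_seqs_L0.filter (fun ev =>
    decide (2 ≤ altSpsNum ev) && decide (PySem.Set.len ev ≤ altSpsNum ev))
  let paralogs_L := offcut_ev_seqs_L0.filter (fun ev =>
    decide (2 ≤ altSpsNum ev) && decide (altSpsNum ev < PySem.Set.len ev))
  -- k runs over range(len(paralogs_L)), a nonnegative in-range index, so paralogs_L[k] is getD
  let order := PySem.List.sorted (List.range paralogs_L.length)
    (fun k => -(PySem.Set.len (paralogs_L.getD k [])))
  let kept := order.foldl (fun kept k =>
    let s := paralogs_L.getD k []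
    if kept.any (fun it => altLt s it.2) then kept else kept ++ [(k, s)])
    ([] : List (Nat × List String))
  let keptIdx := PySem.List.sorted (kept.map Prod.fst) (fun k => k)
  (othologs_L, keptIdx.map (fun k => paralogs_L.getD k []))

-- ===== PRECONDITION & SPEC =====
-- Each inner list encodes a Python set, so its elements are distinct; Pre_ excludes only
-- inner lists with duplicates, which encode no set input of A.
def Pre_split_offcut_ev_seqs (offcut_ev_seqs_L0 : List (List String)) : Prop :=
  ∀ ev ∈ offcut_ev_seqs_L0, ev.Nodup
instance (offcut_ev_seqs_L0 : List (List String)) : Decidable (Pre_split_offcut_ev_seqs offcut_ev_seqs_L0) := by unfold Pre_split_offcut_ev_seqs; infer_instance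

def pvWitness_split_offcut_ev_seqs : List (List String) :=
  [["aaa1", "bbb1", "bbb2"], ["aaa1", "bbb1"]]

def Spec_split_offcut_ev_seqs (offcut_ev_seqs_L0 : List (List String)) (out : List (List String) × List (List String)) : Prop := out = split_offcut_ev_seqs_alt offcut_ev_seqs_L0
instance (offcut_ev_seqs_L0 : List (List String)) (out : List (List String) × List (List String)) : Decidable (Spec_split_offcut_ev_seqs offcut_ev_seqs_L0 out) := by unfold Spec_split_offcut_ev_seqs; infer_instance

-- ===== CLAIM (what is proved, stated in full; the proofs are below) =====
def Claim_equal_split_offcut_ev_seqs : Prop := ∀ (offcut_ev_seqs_L0 : List (List String)), Dom_split_offcut_ev_seqs offcut_ev_seqs_L0 → Pre_split_offcut_ev_seqs offcut_ev_seqs_L0 → Spec_split_offcut_ev_seqs offcut_ev_seqs_L0 (split_offcut_ev_seqs offcut_ev_seqs_L0)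

-- ===== LEMMAS AND PROOFS =====

theorem altLt_eq : altLt = pySetLt := rfl
theorem altSpsNum_eq : altSpsNum = count_sps_num := rfl

-- the per-element survival test of A's rm_dup, as a Bool predicate
def keepB (P : List (List String)) (x : List String) : Bool := !(P.any (fun y => pySetLt x y))

-- B's dedup step over sorted indices
def stepB (P : List (List String)) (K : List (Nat × List String)) (k : Nat) :
    List (Nat × List String) :=
  let s := P.getD k []
  if K.any (fun it => pySetLt s it.2) then K else K ++ [(k, s)]

theorem pySetLt_iff (s t : List String) :
    pySetLt s t = true ↔ (∀ a ∈ s, a ∈ t) ∧ ¬(∀ a ∈ t, a ∈ s) := by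
  constructor
  · intro h
    simp only [pySetLt, PySem.Set.equal, Bool.and_eq_true, Bool.not_eq_true'] at h
    obtain ⟨h1, h2⟩ := h
    refine ⟨(PySem.Set.issubset_iff s t).1 h1, fun hts => ?_⟩
    rw [Bool.and_eq_false_iff] at h2
    rcases h2 with h2 | h2
    · rw [h1] at h2; simp at h2
    · rw [(PySem.Set.issubset_iff t s).2 hts] at h2; simp at h2
  · rintro ⟨h1, h2⟩
    have h1' := (PySem.Set.issubset_iff s t).2 h1
    have hts : PySem.Set.issubset t s = false := by
      cases hts : PySem.Set.issubset t s
      · rfl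
      · exact absurd ((PySem.Set.issubset_iff t s).1 hts) h2
    simp [pySetLt, PySem.Set.equal, h1', hts]

theorem pySetLt_irrefl (s : List String) : pySetLt s s = false := by
  cases h : pySetLt s s
  · rfl
  · have := (pySetLt_iff s s).1 h
    exact absurd (fun a ha => ha) this.2

theorem pySetLt_trans {s t u : List String} (h1 : pySetLt s t = true)
    (h2 : pySetLt t u = true) : pySetLt s u = true := by
  rw [pySetLt_iff] at *
  obtain ⟨a1, b1⟩ := h1; obtain ⟨a2, b2⟩ := h2
  exact ⟨fun a ha => a2 a (a1 a ha), fun h => b2 (fun a ha => a1 a (h a ha))⟩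

theorem length_lt_of_pySetLt {s t : List String} (hs : s.Nodup)
    (h : pySetLt s t = true) : s.length < t.length := by
  rw [pySetLt_iff] at h
  obtain ⟨hsub, hne⟩ := h
  push Not at hne
  obtain ⟨a, ha, hna⟩ := hne
  have h1 : s ⊆ t.erase a := fun x hx =>
    (List.mem_erase_of_ne (by rintro rfl; exact hna hx)).2 (hsub x hx)
  have h2 : s.length ≤ (t.erase a).length := List.Subperm.length_le (List.subperm_of_subset hs h1)
  have h3 := List.length_erase_of_mem ha
  have ht : 0 < t.length := List.length_pos_of_mem ha
  omega

theorem setLen_eq (l : List String) : PySem.Set.len l = (l.length : Int) := rfl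

-- A's classification loop is a pair of filters
theorem classify_eq (L : List (List String)) (o p : List (List String)) :
    L.foldl (fun st ev_seqs =>
      let sps_num := count_sps_num ev_seqs
      let seq_num := PySem.Set.len ev_seqs
      if 2 ≤ sps_num then
        if sps_num < seq_num then (st.1, st.2 ++ [ev_seqs]) else (st.1 ++ [ev_seqs], st.2)
      else st) (o, p)
    = (o ++ L.filter (fun ev => decide (2 ≤ count_sps_num ev) && decide (PySem.Set.len ev ≤ count_sps_num ev)),
       p ++ L.filter (fun ev => decide (2 ≤ count_sps_num ev) && decide (count_sps_num ev < PySem.Set.len ev))) := by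
  induction L generalizing o p with
  | nil => simp
  | cons x L ih =>
    simp only [List.foldl_cons, List.filter_cons]
    by_cases h1 : 2 ≤ count_sps_num x
    · by_cases h2 : count_sps_num x < PySem.Set.len x
      · have hno : ¬ (PySem.Set.len x ≤ count_sps_num x) := by omega
        simp only [if_pos h1, if_pos h2, ih]
        rw [setLen_eq] at h2 hno
        simp [h1, h2, hno]
      · have hyes : PySem.Set.len x ≤ count_sps_num x := by omega
        simp only [if_pos h1, if_neg h2, ih]
        rw [setLen_eq] at h2 hyes
        simp [h1, h2, hyes]
    · simp only [if_neg h1, ih]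
      simp [h1]

theorem foldl_skip (l : List (List String)) (c : List String → Bool) (a : List (List String)) :
    l.foldl (fun res x => if c x then res else res ++ [x]) a = a ++ l.filter (fun x => !(c x)) := by
  induction l generalizing a with
  | nil => simp
  | cons x l ih =>
    simp only [List.foldl_cons, List.filter_cons]
    cases h : c x
    · simp [ih]
    · simp [ih]

-- A's rm_dup keeps exactly the sets with no strict superset in the list
theorem rm_dup_eq_filter (P : List (List String)) :
    rm_dup P = P.filter (keepB P) := by
  unfold rm_dup
  have hcongr : (PySem.List.enumerate P).foldl (fun result ie =>
      let is_proper_subset := (PySem.List.enumerate P).any (fun je =>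
        decide (ie.1 ≠ je.1) && pySetLt ie.2 je.2)
      if is_proper_subset then result else result ++ [ie.2]) []
      = (PySem.List.enumerate P).foldl (fun result ie =>
        if P.any (fun y => pySetLt ie.2 y) then result else result ++ [ie.2]) [] := by
    apply PySem.List.foldl_congr_mem
    intro acc ie hie
    obtain ⟨k, hk, rfl⟩ := (PySem.List.mem_enumerate_iff _ _ _).1 hie
    have hinner : ((PySem.List.enumerate P).any (fun je =>
        decide ((0 + (k : Int), P[k]).1 ≠ je.1) && pySetLt (0 + (k : Int), P[k]).2 je.2))
        = P.any (fun y => pySetLt P[k] y) := by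
      cases hA : (PySem.List.enumerate P).any (fun je =>
          decide ((0 + (k : Int), P[k]).1 ≠ je.1) && pySetLt (0 + (k : Int), P[k]).2 je.2)
      · cases hB : P.any (fun y => pySetLt P[k] y)
        · rfl
        · exfalso
          rw [List.any_eq_true] at hB
          obtain ⟨y, hy, hlt⟩ := hB
          obtain ⟨j, hj, rfl⟩ := List.mem_iff_getElem.1 hy
          rw [List.any_eq_false] at hA
          have hje : ((0 : Int) + (j : Int), P[j]) ∈ PySem.List.enumerate P :=
            (PySem.List.mem_enumerate_iff _ _ _).2 ⟨j, hj, rfl⟩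
          have hthis := hA _ hje
          rw [hlt, Bool.and_true] at hthis
          have hkj : k = j := by simpa using hthis
          subst hkj
          rw [pySetLt_irrefl] at hlt
          exact Bool.false_ne_true hlt
      · rw [List.any_eq_true] at hA
        obtain ⟨je, hje, hcond⟩ := hA
        obtain ⟨j, hj, rfl⟩ := (PySem.List.mem_enumerate_iff _ _ _).1 hje
        simp only [Bool.and_eq_true] at hcond
        symm
        rw [List.any_eq_true]
        exact ⟨P[j], List.getElem_mem hj, hcond.2⟩
    rw [hinner]
  rw [hcongr]
  have hmapfold : (PySem.List.enumerate P).foldl (fun result ie =>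
      if P.any (fun y => pySetLt ie.2 y) then result else result ++ [ie.2]) []
      = ((PySem.List.enumerate P).map Prod.snd).foldl (fun result x =>
        if P.any (fun y => pySetLt x y) then result else result ++ [x]) [] := by
    rw [List.foldl_map]
  rw [hmapfold]
  have hsnd : (PySem.List.enumerate P).map Prod.snd = P := PySem.List.map_snd_enumerate P 0
  rw [hsnd, foldl_skip]
  rfl

-- main invariant induction for B's sort-then-single-pass dedup
theorem kept_fold (P : List (List String)) (hP : ∀ x ∈ P, x.Nodup) :
    ∀ (rest : List Nat) (K : List (Nat × List String)),
    (∀ k ∈ rest, k < P.length) →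
    rest.Nodup →
    rest.Pairwise (fun a b => -(PySem.Set.len (P.getD a [])) ≤ -(PySem.Set.len (P.getD b []))) →
    (∀ q ∈ K, q.1 < P.length ∧ q.2 = P.getD q.1 []) →
    (K.map Prod.fst).Nodup →
    (∀ q ∈ K, q.1 ∉ rest) →
    (∀ q ∈ K, ∀ y ∈ P, pySetLt q.2 y = false) →
    (∀ x : List String, ∀ y ∈ P, pySetLt x y = true →
      (∃ j ∈ rest, P.getD j [] = y) ∨ (∃ q ∈ K, pySetLt x q.2 = true)) →
    (∀ q ∈ rest.foldl (stepB P) K, q.1 < P.length ∧ q.2 = P.getD q.1 []) ∧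
    ((rest.foldl (stepB P) K).map Prod.fst).Nodup ∧
    (∀ q ∈ rest.foldl (stepB P) K, ∀ y ∈ P, pySetLt q.2 y = false) ∧
    (∀ k ∈ rest, keepB P (P.getD k []) = true → k ∈ (rest.foldl (stepB P) K).map Prod.fst) ∧
    (∀ q ∈ K, q ∈ rest.foldl (stepB P) K) := by
  intro rest
  induction rest with
  | nil =>
    intro K _ _ _ hK hKnd _ hKeep _
    simp only [List.foldl_nil]
    exact ⟨hK, hKnd, hKeep, by simp, fun q hq => hq⟩
  | cons k r ih =>
    intro K hmem hnd hpair hK hKnd hKrest hKeep hJ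
    have hkn : k < P.length := hmem k List.mem_cons_self
    have hknotr : k ∉ r := (List.nodup_cons.1 hnd).1
    have hndr : r.Nodup := (List.nodup_cons.1 hnd).2
    have hpairhead : ∀ j ∈ r, -(PySem.Set.len (P.getD k [])) ≤ -(PySem.Set.len (P.getD j [])) :=
      (List.pairwise_cons.1 hpair).1
    have hpairr := (List.pairwise_cons.1 hpair).2
    have hmemr : ∀ j ∈ r, j < P.length := fun j hj => hmem j (List.mem_cons_of_mem _ hj)
    simp only [List.foldl_cons]
    by_cases hdrop : K.any (fun it => pySetLt (P.getD k []) it.2) = true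
    · have hstep : stepB P K k
          = (if K.any (fun it => pySetLt (P.getD k []) it.2) then K else K ++ [(k, P.getD k [])]) := rfl
      rw [hstep, if_pos hdrop]
      have hJ' : ∀ x : List String, ∀ y ∈ P, pySetLt x y = true →
          (∃ j ∈ r, P.getD j [] = y) ∨ (∃ q ∈ K, pySetLt x q.2 = true) := by
        intro x y hy hlt
        rcases hJ x y hy hlt with ⟨j, hj, hjy⟩ | hr
        · rcases List.mem_cons.1 hj with rfl | hj'
          · rw [List.any_eq_true] at hdrop
            obtain ⟨it, hit, hitlt⟩ := hdrop
            subst hjy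
            exact Or.inr ⟨it, hit, pySetLt_trans hlt hitlt⟩
          · exact Or.inl ⟨j, hj', hjy⟩
        · exact Or.inr hr
      obtain ⟨c1, c2, c3, c4, c5⟩ := ih K hmemr hndr hpairr hK hKnd
        (fun q hq => fun hmem' => hKrest q hq (List.mem_cons_of_mem _ hmem')) hKeep hJ'
      refine ⟨c1, c2, c3, ?_, c5⟩
      intro k' hk' hkeep
      rcases List.mem_cons.1 hk' with rfl | hk''
      · exfalso
        rw [List.any_eq_true] at hdrop
        obtain ⟨it, hit, hitlt⟩ := hdrop
        have hit2 : it.2 ∈ P := by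
          obtain ⟨h1, h2⟩ := hK it hit
          rw [h2, List.getD_eq_getElem _ _ h1]
          exact List.getElem_mem h1
        have : P.any (fun y => pySetLt (P.getD k' []) y) = true :=
          List.any_eq_true.2 ⟨it.2, hit2, hitlt⟩
        rw [keepB, this] at hkeep
        simp at hkeep
      · exact c4 k' hk'' hkeep
    · have hdropf : K.any (fun it => pySetLt (P.getD k []) it.2) = false :=
        Bool.eq_false_iff.2 hdrop
      have hstep : stepB P K k
          = (if K.any (fun it => pySetLt (P.getD k []) it.2) then K else K ++ [(k, P.getD k [])]) := rfl
      rw [hstep, if_neg hdrop]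
      -- the freshly kept set has no strict superset anywhere in P
      have hkeepk : ∀ y ∈ P, pySetLt (P.getD k []) y = false := by
        intro y hy
        cases hlt : pySetLt (P.getD k []) y
        · rfl
        · exfalso
          rcases hJ (P.getD k []) y hy hlt with ⟨j, hj, hjy⟩ | ⟨q, hq, hqlt⟩
          · rcases List.mem_cons.1 hj with rfl | hj'
            · subst hjy
              rw [pySetLt_irrefl] at hlt; simp at hlt
            · have hlen := hpairhead j hj'
              rw [setLen_eq, setLen_eq] at hlen
              have hnods : (P.getD k []).Nodup := by
                rw [List.getD_eq_getElem _ _ hkn]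
                exact hP _ (List.getElem_mem hkn)
              have := length_lt_of_pySetLt hnods hlt
              rw [hjy] at hlen
              omega
          · rw [List.any_eq_false] at hdropf
            have := hdropf q hq
            rw [hqlt] at this; simp at this
      have hK' : ∀ q ∈ K ++ [(k, P.getD k [])], q.1 < P.length ∧ q.2 = P.getD q.1 [] := by
        intro q hq
        rcases List.mem_append.1 hq with hq | hq
        · exact hK q hq
        · rcases List.mem_singleton.1 hq with rfl
          exact ⟨hkn, rfl⟩
      have hKnd' : ((K ++ [(k, P.getD k [])]).map Prod.fst).Nodup := by
        rw [List.map_append]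
        simp only [List.map_cons, List.map_nil]
        rw [List.nodup_append]
        refine ⟨hKnd, List.nodup_singleton _, ?_⟩
        intro a ha b hb
        rcases List.mem_singleton.1 hb with rfl
        obtain ⟨q, hq, rfl⟩ := List.mem_map.1 ha
        intro h
        exact hKrest q hq (by rw [h]; exact List.mem_cons_self)
      have hKrest' : ∀ q ∈ K ++ [(k, P.getD k [])], q.1 ∉ r := by
        intro q hq
        rcases List.mem_append.1 hq with hq | hq
        · exact fun h => hKrest q hq (List.mem_cons_of_mem _ h)
        · rcases List.mem_singleton.1 hq with rfl
          exact hknotr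
      have hKeep' : ∀ q ∈ K ++ [(k, P.getD k [])], ∀ y ∈ P, pySetLt q.2 y = false := by
        intro q hq
        rcases List.mem_append.1 hq with hq | hq
        · exact hKeep q hq
        · rcases List.mem_singleton.1 hq with rfl
          exact hkeepk
      have hJ' : ∀ x : List String, ∀ y ∈ P, pySetLt x y = true →
          (∃ j ∈ r, P.getD j [] = y) ∨ (∃ q ∈ K ++ [(k, P.getD k [])], pySetLt x q.2 = true) := by
        intro x y hy hlt
        rcases hJ x y hy hlt with ⟨j, hj, hjy⟩ | ⟨q, hq, hqlt⟩
        · rcases List.mem_cons.1 hj with rfl | hj'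
          · subst hjy
            exact Or.inr ⟨(j, P.getD j []), List.mem_append.2 (Or.inr (List.mem_singleton.2 rfl)), hlt⟩
          · exact Or.inl ⟨j, hj', hjy⟩
        · exact Or.inr ⟨q, List.mem_append.2 (Or.inl hq), hqlt⟩
      obtain ⟨c1, c2, c3, c4, c5⟩ := ih (K ++ [(k, P.getD k [])]) hmemr hndr hpairr hK' hKnd' hKrest' hKeep' hJ'
      refine ⟨c1, c2, c3, ?_, ?_⟩
      · intro k' hk' hkeep
        rcases List.mem_cons.1 hk' with rfl | hk''
        · have : (k', P.getD k' []) ∈ r.foldl (stepB P) (K ++ [(k', P.getD k' [])]) :=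
            c5 _ (List.mem_append.2 (Or.inr (List.mem_singleton.2 rfl)))
          exact List.mem_map.2 ⟨_, this, rfl⟩
        · exact c4 k' hk'' hkeep
      · intro q hq
        exact c5 q (List.mem_append.2 (Or.inl hq))

-- indices-then-map form of a filter
theorem filter_via_range (P : List (List String)) (pred : List String → Bool) :
    ((List.range P.length).filter (fun k => pred (P.getD k []))).map (fun k => P.getD k [])
      = P.filter pred := by
  induction P with
  | nil => simp
  | cons x P ih =>
    have hlen : (x :: P).length = P.length + 1 := rfl
    have hcomp : ((fun k => pred ((x :: P).getD k [])) ∘ Nat.succ)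
        = fun k => pred (P.getD k []) := by
      funext k; simp
    have hcomp2 : ((fun k => (x :: P).getD k []) ∘ Nat.succ) = fun k => P.getD k [] := by
      funext k; simp
    rw [hlen, List.range_succ_eq_map]
    cases h : pred x
    · rw [List.filter_cons, List.getD_cons_zero, h]
      simp only [Bool.false_eq_true, if_false]
      rw [List.filter_map, hcomp, List.map_map, hcomp2, ih, List.filter_cons, h]
      simp
    · rw [List.filter_cons, List.getD_cons_zero, h]
      simp only [if_true]
      rw [List.map_cons, List.getD_cons_zero, List.filter_map, hcomp, List.map_map, hcomp2, ih,
        List.filter_cons, h]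
      simp

-- ===== VERDICT (by name: the statement is the Claim_ definition above) =====
theorem stepB_eta (P : List (List String)) :
    (fun (kept : List (Nat × List String)) (k : Nat) =>
      if kept.any (fun it => pySetLt (P.getD k []) it.2) then kept else kept ++ [(k, P.getD k [])])
    = stepB P := rfl

theorem bside (P : List (List String)) (hP : ∀ x ∈ P, x.Nodup) :
    (PySem.List.sorted
      (((PySem.List.sorted (List.range P.length) (fun k => -(PySem.Set.len (P.getD k [])))).foldl
        (stepB P) []).map Prod.fst) (fun k => k)).map (fun k => P.getD k [])
    = P.filter (keepB P) := by
  set order := PySem.List.sorted (List.range P.length)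
    (fun k => -(PySem.Set.len (P.getD k []))) with horder
  have hperm : order.Perm (List.range P.length) := PySem.List.sorted_perm _ _ _
  have hmem : ∀ k ∈ order, k < P.length := by
    intro k hk
    exact List.mem_range.1 (hperm.mem_iff.1 hk)
  have hnd : order.Nodup := hperm.nodup_iff.2 (List.nodup_range)
  have hpair : order.Pairwise (fun a b =>
      -(PySem.Set.len (P.getD a [])) ≤ -(PySem.Set.len (P.getD b []))) :=
    PySem.List.sorted_pairwise _ _
  have hJ : ∀ x : List String, ∀ y ∈ P, pySetLt x y = true →
      (∃ j ∈ order, P.getD j [] = y) ∨ (∃ q ∈ ([] : List (Nat × List String)), pySetLt x q.2 = true) := by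
    intro x y hy _
    obtain ⟨j, hj, rfl⟩ := List.mem_iff_getElem.1 hy
    refine Or.inl ⟨j, hperm.mem_iff.2 (List.mem_range.2 hj), ?_⟩
    exact List.getD_eq_getElem _ _ hj
  obtain ⟨c1, c2, c3, c4, _⟩ := kept_fold P hP order [] hmem hnd hpair
    (by simp) (by simp) (by simp) (by simp) hJ
  set R := order.foldl (stepB P) [] with hR
  have hmemiff : ∀ a, a ∈ R.map Prod.fst ↔
      a ∈ (List.range P.length).filter (fun k => keepB P (P.getD k [])) := by
    intro a
    constructor
    · intro ha
      obtain ⟨q, hq, rfl⟩ := List.mem_map.1 ha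
      obtain ⟨h1, h2⟩ := c1 q hq
      rw [List.mem_filter, List.mem_range]
      refine ⟨h1, ?_⟩
      rw [← h2, keepB]
      rw [List.any_eq_false.2 (fun x hx => by simp [c3 q hq x hx])]
      rfl
    · intro ha
      rw [List.mem_filter, List.mem_range] at ha
      exact c4 a (hperm.mem_iff.2 (List.mem_range.2 ha.1)) ha.2
  have hsorted : PySem.List.sorted (R.map Prod.fst) (fun k => k)
      = (List.range P.length).filter (fun k => keepB P (P.getD k [])) := by
    apply PySem.List.sorted_eq_of_perm_of_pairwise_lt
    · rw [List.perm_ext_iff_of_nodup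
        (List.Nodup.filter _ List.nodup_range) c2]
      intro a; exact (hmemiff a).symm
    · exact List.Pairwise.filter _ (List.pairwise_lt_range)
  rw [hsorted, filter_via_range]

theorem split_offcut_ev_seqs_spec : Claim_equal_split_offcut_ev_seqs := by
  intro L _ hpre
  unfold Spec_split_offcut_ev_seqs
  unfold split_offcut_ev_seqs split_offcut_ev_seqs_alt
  simp only [altLt_eq, altSpsNum_eq]
  rw [classify_eq]
  simp only [List.nil_append]
  rw [rm_dup_eq_filter, stepB_eta,
    bside _ (fun x hx => hpre x (List.mem_of_mem_filter hx))]
  rfl
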